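-- pv_equiv track=rewrite | github.com/jakepgoldman/CIS550Project | my-app/app/connect_to_db.py | get_inner_function
-- ===== SOURCE A (Python) =====
-- def get_inner_function(base, sorted_values, i, table_map, asc_map, index, group_by_state):
--     i = i - 1;
--     if i < 0:
--         return base
--     else:
--         attribute = table_map[sorted_values[i]]
--         sort = asc_map[sorted_values[i]]
--         inner_query = get_inner_function(base, sorted_values, i, table_map, asc_map, index, group_by_state)
--         null_clause = ""
--         if group_by_state:
--             if i == 0:
--                 null_clause = "WHERE {attribute} IS NOT NULL".format(attribute=attribute)
--             return """
--                 SELECT * FROM (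
--                     SELECT a{i}.*, RANK() OVER (PARTITION BY state_name ORDER BY {attribute} {sort}) AS rank{i}
--                     FROM ({inner}) a{i} {null_clause}
--                 ) WHERE rank{i} < {num_value}
--                 """.format(attribute=attribute, num_value=index[i], i=i, inner=inner_query, sort=sort, null_clause=null_clause)
--         else:
--             if i == 0:
--                 null_clause = "WHERE {attribute} IS NOT NULL".format(attribute=attribute)
--             return """
--                 SELECT * FROM (
--                     SELECT * FROM ({inner}) {null_clause} ORDER BY {attribute} {sort}
--                 ) WHERE ROWNUM < {num_value}
--                 """.format(attribute=attribute, num_value=index[i], inner=inner_query, sort=sort, null_clause=null_clause)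
-- ===== SOURCE B (Python) =====
-- def _wrap(inner, attribute, sort, num_value, j, null_clause, group_by_state):
--     if group_by_state:
--         return (
--             "\n                SELECT * FROM (\n"
--             f"                    SELECT a{j}.*, RANK() OVER (PARTITION BY state_name ORDER BY {attribute} {sort}) AS rank{j}\n"
--             f"                    FROM ({inner}) a{j} {null_clause}\n"
--             f"                ) WHERE rank{j} < {num_value}\n"
--             "                "
--         )
--     return (
--         "\n                SELECT * FROM (\n"
--         f"                    SELECT * FROM ({inner}) {null_clause} ORDER BY {attribute} {sort}\n"
--         f"                ) WHERE ROWNUM < {num_value}\n"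
--         "                "
--     )
--
--
-- def get_inner_function(base, sorted_values, i, table_map, asc_map, index, group_by_state):
--     result = base
--     for j in range(i):
--         key = sorted_values[j]
--         attribute = table_map[key]
--         null_clause = f"WHERE {attribute} IS NOT NULL" if j == 0 else ""
--         result = _wrap(result, attribute, asc_map[key], index[j], j, null_clause, group_by_state)
--     return result
-- ===== Notes on version B (the rewrite author's own statement) =====
-- stated objective: simpler
-- what changed: Replaces A's self-recursion (decrement-then-recurse) with a single iterative loop that builds the nested query from the innermost level (j=0) outward, wrapping via a shared helper; same O(i) wraps, no recursion.
import Mathlib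
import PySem

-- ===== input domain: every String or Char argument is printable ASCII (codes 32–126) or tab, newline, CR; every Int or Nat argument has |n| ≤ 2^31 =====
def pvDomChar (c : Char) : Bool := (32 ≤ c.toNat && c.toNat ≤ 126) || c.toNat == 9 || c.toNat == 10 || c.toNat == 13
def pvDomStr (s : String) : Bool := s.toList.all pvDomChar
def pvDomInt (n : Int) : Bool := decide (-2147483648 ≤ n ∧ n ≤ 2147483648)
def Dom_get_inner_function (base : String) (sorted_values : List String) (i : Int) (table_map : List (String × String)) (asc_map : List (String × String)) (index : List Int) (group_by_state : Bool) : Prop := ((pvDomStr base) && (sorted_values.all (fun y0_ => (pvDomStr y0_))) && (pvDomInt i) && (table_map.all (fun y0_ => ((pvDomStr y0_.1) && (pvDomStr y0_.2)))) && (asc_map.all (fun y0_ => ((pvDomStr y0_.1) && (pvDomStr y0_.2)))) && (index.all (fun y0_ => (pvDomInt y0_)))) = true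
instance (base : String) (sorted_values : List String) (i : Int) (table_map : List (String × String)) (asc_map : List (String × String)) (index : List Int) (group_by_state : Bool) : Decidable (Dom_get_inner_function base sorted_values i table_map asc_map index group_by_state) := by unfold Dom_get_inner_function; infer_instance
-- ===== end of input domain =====

-- B replaces A's self-recursion by a single iterative loop that wraps the query
-- from the innermost level outward (objective: simpler decomposition; same cost).

-- ===== PORT A =====
-- Literal port of A's recursion: decrement i, base case, dict/list accesses totalized
-- with getD (Pre_ guarantees they succeed), then the two .format templates inline.
def get_inner_function (base : String) (sorted_values : List String) (i : Int) (table_map : List (String × String)) (asc_map : List (String × String)) (index : List Int) (group_by_state : Bool) : String :=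
  let i' := i - 1
  if h : i' < 0 then base
  else
    let attr := (PySem.Dict.get? (PySem.Dict.mk table_map) ((PySem.List.pyGet? sorted_values i').getD "")).getD ""
    let sort := (PySem.Dict.get? (PySem.Dict.mk asc_map) ((PySem.List.pyGet? sorted_values i').getD "")).getD ""
    let inner_query := get_inner_function base sorted_values i' table_map asc_map index group_by_state
    let num_value := (PySem.List.pyGet? index i').getD 0
    if group_by_state then
      let null_clause := if i' = 0 then "WHERE " ++ attr ++ " IS NOT NULL" else ""
      "\n                SELECT * FROM (\n                    SELECT a" ++ PySem.Int.toStr i' ++ ".*, RANK() OVER (PARTITION BY state_name ORDER BY " ++ attr ++ " " ++ sort ++ ") AS rank" ++ PySem.Int.toStr i' ++ "\n                    FROM (" ++ inner_query ++ ") a" ++ PySem.Int.toStr i' ++ " " ++ null_clause ++ "\n                ) WHERE rank" ++ PySem.Int.toStr i' ++ " < " ++ PySem.Int.toStr num_value ++ "\n                "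
    else
      let null_clause := if i' = 0 then "WHERE " ++ attr ++ " IS NOT NULL" else ""
      "\n                SELECT * FROM (\n                    SELECT * FROM (" ++ inner_query ++ ") " ++ null_clause ++ " ORDER BY " ++ attr ++ " " ++ sort ++ "\n                ) WHERE ROWNUM < " ++ PySem.Int.toStr num_value ++ "\n                "
  termination_by i.toNat
  decreasing_by omega

-- ===== PORT B =====
-- Port of Source B's _wrap helper (f-string templates).
def pvWrap (inner attr sort : String) (num_value j : Int) (null_clause : String) (group_by_state : Bool) : String :=
  if group_by_state then
    "\n                SELECT * FROM (\n                    SELECT a" ++ PySem.Int.toStr j ++ ".*, RANK() OVER (PARTITION BY state_name ORDER BY " ++ attr ++ " " ++ sort ++ ") AS rank" ++ PySem.Int.toStr j ++ "\n                    FROM (" ++ inner ++ ") a" ++ PySem.Int.toStr j ++ " " ++ null_clause ++ "\n                ) WHERE rank" ++ PySem.Int.toStr j ++ " < " ++ PySem.Int.toStr num_value ++ "\n                "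
  else
    "\n                SELECT * FROM (\n                    SELECT * FROM (" ++ inner ++ ") " ++ null_clause ++ " ORDER BY " ++ attr ++ " " ++ sort ++ "\n                ) WHERE ROWNUM < " ++ PySem.Int.toStr num_value ++ "\n                "

-- Port of Source B's loop: for j in range(i), wrap the accumulated result.
def get_inner_function_alt (base : String) (sorted_values : List String) (i : Int) (table_map : List (String × String)) (asc_map : List (String × String)) (index : List Int) (group_by_state : Bool) : String :=
  (PySem.List.pyRange 0 i 1).foldl
    (fun result j =>
      let key := (PySem.List.pyGet? sorted_values j).getD ""
      let attr := (PySem.Dict.get? (PySem.Dict.mk table_map) key).getD ""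
      let null_clause := if j = 0 then "WHERE " ++ attr ++ " IS NOT NULL" else ""
      pvWrap result attr ((PySem.Dict.get? (PySem.Dict.mk asc_map) key).getD "") ((PySem.List.pyGet? index j).getD 0) j null_clause group_by_state)
    base

-- ===== PRECONDITION & SPEC =====
-- Pre_: exactly the inputs where Python A returns (it raises IndexError/KeyError when
-- some level 0 ≤ j < i is out of range of sorted_values/index or its key misses a map).
def Pre_get_inner_function (base : String) (sorted_values : List String) (i : Int) (table_map : List (String × String)) (asc_map : List (String × String)) (index : List Int) (group_by_state : Bool) : Prop :=
  i ≤ (sorted_values.length : Int) ∧ i ≤ (index.length : Int) ∧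
  ∀ s ∈ sorted_values.take i.toNat, (PySem.Dict.get? (PySem.Dict.mk table_map) s).isSome ∧ (PySem.Dict.get? (PySem.Dict.mk asc_map) s).isSome
instance (base : String) (sorted_values : List String) (i : Int) (table_map : List (String × String)) (asc_map : List (String × String)) (index : List Int) (group_by_state : Bool) : Decidable (Pre_get_inner_function base sorted_values i table_map asc_map index group_by_state) := by unfold Pre_get_inner_function; infer_instance
def pvWitness_get_inner_function : String × List String × Int × (List (String × String)) × (List (String × String)) × List Int × Bool :=
  ("SELECT * FROM t", ["pop", "area"], 2, [("pop", "population"), ("area", "land_area")], [("pop", "ASC"), ("area", "DESC")], [5, 7], true)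

def Spec_get_inner_function (base : String) (sorted_values : List String) (i : Int) (table_map : List (String × String)) (asc_map : List (String × String)) (index : List Int) (group_by_state : Bool) (out : String) : Prop := out = get_inner_function_alt base sorted_values i table_map asc_map index group_by_state
instance (base : String) (sorted_values : List String) (i : Int) (table_map : List (String × String)) (asc_map : List (String × String)) (index : List Int) (group_by_state : Bool) (out : String) : Decidable (Spec_get_inner_function base sorted_values i table_map asc_map index group_by_state out) := by unfold Spec_get_inner_function; infer_instance

-- ===== CLAIM (what is proved, stated in full; the proofs are below) =====
def Claim_equal_get_inner_function : Prop := ∀ (base : String) (sorted_values : List String) (i : Int) (table_map : List (String × String)) (asc_map : List (String × String)) (index : List Int) (group_by_state : Bool), Dom_get_inner_function base sorted_values i table_map asc_map index group_by_state → Pre_get_inner_function base sorted_values i table_map asc_map index group_by_state → Spec_get_inner_function base sorted_values i table_map asc_map index group_by_state (get_inner_function base sorted_values i table_map asc_map index group_by_state)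

-- ===== LEMMAS AND PROOFS =====

-- A and B agree on every input (the getD totalization makes both total the same way);
-- induction on i.toNat, splitting the final element off B's range with pyRange_one_succ_right.
theorem get_inner_function_eq_alt (base : String) (sorted_values : List String) (i : Int) (table_map : List (String × String)) (asc_map : List (String × String)) (index : List Int) (group_by_state : Bool) :
    get_inner_function base sorted_values i table_map asc_map index group_by_state
      = get_inner_function_alt base sorted_values i table_map asc_map index group_by_state := by
  induction hn : i.toNat generalizing i with
  | zero =>
    have hi : i - 1 < 0 := by omega
    rw [get_inner_function, get_inner_function_alt, PySem.List.pyRange_one_eq_nil (by omega)]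
    simp [hi]
  | succ n ih =>
    have h1 : (0:Int) ≤ i - 1 := by omega
    have hsplit : PySem.List.pyRange 0 i 1 = PySem.List.pyRange 0 (i-1) 1 ++ [i-1] := by
      have := PySem.List.pyRange_one_succ_right (a := 0) (b := i - 1) h1
      rw [sub_add_cancel] at this
      exact this
    have hrec : get_inner_function base sorted_values (i-1) table_map asc_map index group_by_state
        = get_inner_function_alt base sorted_values (i-1) table_map asc_map index group_by_state :=
      ih (i-1) (by omega)
    rw [get_inner_function]
    rw [dif_neg (by omega : ¬ (i - 1 < 0))]
    conv_rhs => rw [get_inner_function_alt, hsplit, List.foldl_append]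
    rw [show (PySem.List.pyRange 0 (i-1) 1).foldl _ base
        = get_inner_function_alt base sorted_values (i-1) table_map asc_map index group_by_state from rfl]
    rw [← hrec]
    simp only [List.foldl_cons, List.foldl_nil, pvWrap]

-- ===== VERDICT (by name: the statement is the Claim_ definition above) =====
theorem get_inner_function_spec : Claim_equal_get_inner_function := by
  intro base sorted_values i table_map asc_map index group_by_state _ _
  exact get_inner_function_eq_alt base sorted_values i table_map asc_map index group_by_state
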